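-- pv_equiv track=rewrite | github.com/cfrankovich/ARTSS | utils/map_handler.py | get_holdpoint_paths
-- ===== SOURCE A (Python) =====
-- LOOP_LENGTH      = 50
--
-- LOOP_WIDTH       = 40
--
-- DIAG_SIDE_LENGTH = 10
--
-- ENTRY_SPACE      = 10
--
-- def get_holdpoint_paths(a, b, facing_dir, path_num, just_start=False):
--     ns = facing_dir % 2 == 0
--     ew = not ns
--     ns *= 1 if facing_dir % 3 == 0 else -1
--     ew *= -1 if facing_dir % 3 == 0 else 1
--
--     bx = a + ((LOOP_LENGTH + ENTRY_SPACE + DIAG_SIDE_LENGTH) * ew)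
--     by = b + ((LOOP_LENGTH + ENTRY_SPACE + DIAG_SIDE_LENGTH) * ns)
--
--     path_1 = []
--     x1 = bx - ((LOOP_WIDTH + DIAG_SIDE_LENGTH) * ns)
--     y1 = by - ((LOOP_WIDTH + DIAG_SIDE_LENGTH) * ew)
--
--     if just_start:
--         if path_num == 1:
--             return (x1, y1)
--         else:
--             if ew == 0:
--                 return ((2 * bx) - x1, y1)
--             else:
--                 return(x1, (2 * by) - y1)
--
--     for _ in range(LOOP_LENGTH + ENTRY_SPACE):
--         path_1.append((x1, y1))
--         x1 -= 1 * ew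
--         y1 -= 1 * ns
--
--     for _ in range(LOOP_WIDTH):
--         path_1.append((x1, y1))
--         x1 += 1 * ns
--         y1 += 1 * ew
--
--     for _ in range(LOOP_LENGTH):
--         path_1.append((x1, y1))
--         x1 += 1 * ew
--         y1 += 1 * ns
--
--     for _ in range(LOOP_WIDTH):
--         path_1.append((x1, y1))
--         x1 -= 1 * ns
--         y1 -= 1 * ew
--
--     for _ in range(LOOP_LENGTH):
--         path_1.append((x1, y1))
--         x1 -= 1 * ew
--         y1 -= 1 * ns
--
--     for _ in range(LOOP_WIDTH):
--         path_1.append((x1, y1))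
--         x1 += 1 * ns
--         y1 += 1 * ew
--
--     for _ in range(ENTRY_SPACE):
--         path_1.append((x1, y1))
--         if ew == 0:
--             x1 += 1 * ns
--             y1 -= 1 * ns
--         else:
--             x1 -= 1 * ew
--             y1 += 1 * ew
--
--     if path_num == 1:
--         return path_1
--
--     if ew == 0:
--         path_2 = [((2 * bx) - node[0], node[1]) for node in path_1]
--     else:
--         path_2 = [(node[0], (2 * by) - node[1]) for node in path_1]
--
--     return path_2
-- ===== SOURCE B (Python) =====
-- LOOP_LENGTH      = 50
-- LOOP_WIDTH       = 40
-- DIAG_SIDE_LENGTH = 10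
-- ENTRY_SPACE      = 10
--
-- # Canonical holdpoint template, computed once in a local frame whose entry leg
-- # points "down": entry leg, rectangle perimeter, then the angled exit leg.
-- _L = LOOP_LENGTH
-- _W = LOOP_WIDTH
-- _E = ENTRY_SPACE
-- _CANON = (
--     [(0, -i) for i in range(_L + _E)]
--     + [(j, -(_L + _E)) for j in range(_W)]
--     + [(_W, i - (_L + _E)) for i in range(_L)]
--     + [(_W - j, -_E) for j in range(_W)]
--     + [(0, -_E - i) for i in range(_L)]
--     + [(j, -(_L + _E)) for j in range(_W)]
--     + [(_W + i, -(_L + _E) - i) for i in range(_E)]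
-- )
--
-- def get_holdpoint_paths(a, b, facing_dir, path_num, just_start=False):
--     ns = facing_dir % 2 == 0
--     ew = not ns
--     ns *= 1 if facing_dir % 3 == 0 else -1
--     ew *= -1 if facing_dir % 3 == 0 else 1
--
--     bx = a + ((LOOP_LENGTH + ENTRY_SPACE + DIAG_SIDE_LENGTH) * ew)
--     by = b + ((LOOP_LENGTH + ENTRY_SPACE + DIAG_SIDE_LENGTH) * ns)
--     x1 = bx - ((LOOP_WIDTH + DIAG_SIDE_LENGTH) * ns)
--     y1 = by - ((LOOP_WIDTH + DIAG_SIDE_LENGTH) * ew)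
--
--     if just_start:
--         if path_num == 1:
--             return (x1, y1)
--         if ew == 0:
--             return ((2 * bx) - x1, y1)
--         return (x1, (2 * by) - y1)
--
--     # place the fixed template into the world by the linear transform
--     # (p, q) -> (ns*p + ew*q, ew*p + ns*q) anchored at (x1, y1)
--     path_1 = [(x1 + ns * p + ew * q, y1 + ew * p + ns * q) for (p, q) in _CANON]
--
--     if path_num == 1:
--         return path_1
--     if ew == 0:
--         return [((2 * bx) - x, y) for (x, y) in path_1]
--     return [(x, (2 * by) - y) for (x, y) in path_1]
-- ===== Notes on version B (the rewrite author's own statement) =====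
-- stated objective: alternative
-- what changed: B computes one fixed canonical template path (entry leg, rectangle perimeter, exit leg) in a local frame as closed-form comprehensions and places it into the world with the linear transform (p,q)->(ns*p+ew*q, ew*p+ns*q), instead of A's seven direction-dependent append-then-step loops.
-- outside the precondition, e.g. on get_holdpoint_paths(0, 0, 0, 1, True): A returns [-50, 70], B returns [-50, 70]
import Mathlib
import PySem

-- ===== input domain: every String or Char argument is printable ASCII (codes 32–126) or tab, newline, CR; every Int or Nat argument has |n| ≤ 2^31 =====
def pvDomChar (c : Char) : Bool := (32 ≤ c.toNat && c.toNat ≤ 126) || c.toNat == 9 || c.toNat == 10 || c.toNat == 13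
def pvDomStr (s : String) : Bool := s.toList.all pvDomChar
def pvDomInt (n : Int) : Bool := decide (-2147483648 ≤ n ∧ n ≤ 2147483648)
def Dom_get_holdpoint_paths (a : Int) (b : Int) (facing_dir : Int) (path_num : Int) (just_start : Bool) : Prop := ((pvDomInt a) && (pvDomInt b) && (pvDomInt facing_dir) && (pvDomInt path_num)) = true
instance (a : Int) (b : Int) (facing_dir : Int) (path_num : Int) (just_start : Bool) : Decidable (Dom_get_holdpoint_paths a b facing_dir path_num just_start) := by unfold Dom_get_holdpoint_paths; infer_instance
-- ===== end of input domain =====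

-- B replaces A's seven direction-dependent stepping loops by ONE fixed canonical
-- template path (local frame) placed into the world by a linear transform
-- (p,q) ↦ (ns*p+ew*q, ew*p+ns*q) anchored at the start point (objective: simpler).
-- Return-value equivalence only.

-- ===== PORT A =====
-- one stepping loop of A: append (x,y), then x += dx, y += dy, `count` times
def loopA (dx dy : Int) : Nat → Int → Int → List (Int × Int) → Int × Int × List (Int × Int)
  | 0, x, y, acc => (x, y, acc)
  | n + 1, x, y, acc => loopA dx dy n (x + dx) (y + dy) (acc ++ [(x, y)])

-- A's last loop, which branches on `ew == 0` inside the body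
def loopA7 (ns ew : Int) : Nat → Int → Int → List (Int × Int) → Int × Int × List (Int × Int)
  | 0, x, y, acc => (x, y, acc)
  | n + 1, x, y, acc =>
      if ew = 0 then loopA7 ns ew n (x + ns) (y - ns) (acc ++ [(x, y)])
      else loopA7 ns ew n (x - ew) (y + ew) (acc ++ [(x, y)])

-- A's construction of path_1: the seven stepping loops in sequence
def buildPath1 (ns ew x1 y1 : Int) : List (Int × Int) :=
  let s1 := loopA (-ew) (-ns) 60 x1 y1 []
  let s2 := loopA ns ew 40 s1.1 s1.2.1 s1.2.2
  let s3 := loopA ew ns 50 s2.1 s2.2.1 s2.2.2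
  let s4 := loopA (-ns) (-ew) 40 s3.1 s3.2.1 s3.2.2
  let s5 := loopA (-ew) (-ns) 50 s4.1 s4.2.1 s4.2.2
  let s6 := loopA ns ew 40 s5.1 s5.2.1 s5.2.2
  let s7 := loopA7 ns ew 10 s6.1 s6.2.1 s6.2.2
  s7.2.2

def get_holdpoint_paths (a : Int) (b : Int) (facing_dir : Int) (path_num : Int) (just_start : Bool) : List (Int × Int) :=
  -- ns/ew: Python bools multiplied into ints
  let ns : Int := (if PySem.Int.mod facing_dir 2 = 0 then 1 else 0) * (if PySem.Int.mod facing_dir 3 = 0 then 1 else -1)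
  let ew : Int := (if PySem.Int.mod facing_dir 2 = 0 then 0 else 1) * (if PySem.Int.mod facing_dir 3 = 0 then -1 else 1)
  let bx : Int := a + (50 + 10 + 10) * ew
  let by_ : Int := b + (50 + 10 + 10) * ns
  let x1 : Int := bx - (40 + 10) * ns
  let y1 : Int := by_ - (40 + 10) * ew
  if just_start then []  -- Python returns a bare (x, y) tuple here, not a list; excluded by Pre_
  else
    let path1 := buildPath1 ns ew x1 y1
    if path_num = 1 then path1
    else if ew = 0 then path1.map (fun node => (2 * bx - node.1, node.2))
    else path1.map (fun node => (node.1, 2 * by_ - node.2))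

-- ===== PORT B =====
-- Source B's _CANON: the fixed template path in the local frame (entry leg pointing down)
def canonHold : List (Int × Int) :=
  ((List.range 60).map (fun (i : Nat) => ((0 : Int), -(i : Int))))
  ++ ((List.range 40).map (fun (j : Nat) => ((j : Int), (-60 : Int))))
  ++ ((List.range 50).map (fun (i : Nat) => ((40 : Int), (i : Int) - 60)))
  ++ ((List.range 40).map (fun (j : Nat) => ((40 : Int) - (j : Int), (-10 : Int))))
  ++ ((List.range 50).map (fun (i : Nat) => ((0 : Int), -10 - (i : Int))))
  ++ ((List.range 40).map (fun (j : Nat) => ((j : Int), (-60 : Int))))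
  ++ ((List.range 10).map (fun (i : Nat) => (40 + (i : Int), -60 - (i : Int))))

def get_holdpoint_paths_alt (a : Int) (b : Int) (facing_dir : Int) (path_num : Int) (just_start : Bool) : List (Int × Int) :=
  let ns : Int := (if PySem.Int.mod facing_dir 2 = 0 then 1 else 0) * (if PySem.Int.mod facing_dir 3 = 0 then 1 else -1)
  let ew : Int := (if PySem.Int.mod facing_dir 2 = 0 then 0 else 1) * (if PySem.Int.mod facing_dir 3 = 0 then -1 else 1)
  let bx : Int := a + (50 + 10 + 10) * ew
  let by_ : Int := b + (50 + 10 + 10) * ns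
  let x1 : Int := bx - (40 + 10) * ns
  let y1 : Int := by_ - (40 + 10) * ew
  if just_start then []  -- same as Source B: bare tuple in Python; excluded by Pre_
  else
    let path1 := canonHold.map (fun pq => (x1 + ns * pq.1 + ew * pq.2, y1 + ew * pq.1 + ns * pq.2))
    if path_num = 1 then path1
    else if ew = 0 then path1.map (fun node => (2 * bx - node.1, node.2))
    else path1.map (fun node => (node.1, 2 * by_ - node.2))

-- ===== PRECONDITION & SPEC =====
-- Pre_ excludes just_start = true, where Python A returns a bare coordinate tuple
-- instead of a list of pairs — not a value of the declared type List (Int × Int).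
def Pre_get_holdpoint_paths (a : Int) (b : Int) (facing_dir : Int) (path_num : Int) (just_start : Bool) : Prop := just_start = false
instance (a : Int) (b : Int) (facing_dir : Int) (path_num : Int) (just_start : Bool) : Decidable (Pre_get_holdpoint_paths a b facing_dir path_num just_start) := by unfold Pre_get_holdpoint_paths; infer_instance
def pvWitness_get_holdpoint_paths : Int × Int × Int × Int × Bool := (0, 0, 0, 1, false)

def Spec_get_holdpoint_paths (a : Int) (b : Int) (facing_dir : Int) (path_num : Int) (just_start : Bool) (out : List (Int × Int)) : Prop := out = get_holdpoint_paths_alt a b facing_dir path_num just_start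
instance (a : Int) (b : Int) (facing_dir : Int) (path_num : Int) (just_start : Bool) (out : List (Int × Int)) : Decidable (Spec_get_holdpoint_paths a b facing_dir path_num just_start out) := by unfold Spec_get_holdpoint_paths; infer_instance

-- ===== CLAIM (what is proved, stated in full; the proofs are below) =====
def Claim_equal_get_holdpoint_paths : Prop := ∀ (a : Int) (b : Int) (facing_dir : Int) (path_num : Int) (just_start : Bool), Dom_get_holdpoint_paths a b facing_dir path_num just_start → Pre_get_holdpoint_paths a b facing_dir path_num just_start → Spec_get_holdpoint_paths a b facing_dir path_num just_start (get_holdpoint_paths a b facing_dir path_num just_start)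

-- ===== LEMMAS AND PROOFS =====
-- one segment of A's walk, in closed form over range(n)
def segA (x y dx dy : Int) (n : Nat) : List (Int × Int) :=
  (List.range n).map (fun (i : Nat) => (x + (i : Int) * dx, y + (i : Int) * dy))

theorem segA_succ (x y dx dy : Int) (n : Nat) :
    segA x y dx dy (n + 1) = (x, y) :: segA (x + dx) (y + dy) dx dy n := by
  simp only [segA, List.range_succ_eq_map, List.map_cons, List.map_map]
  refine congrArg₂ List.cons (by norm_num) ?_
  refine List.map_congr_left fun i _ => ?_
  simp only [Function.comp_apply]
  push_cast
  exact Prod.ext (by ring) (by ring)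

theorem loopA_eq (dx dy : Int) (n : Nat) (x y : Int) (acc : List (Int × Int)) :
    loopA dx dy n x y acc = (x + n * dx, y + n * dy, acc ++ segA x y dx dy n) := by
  induction n generalizing x y acc with
  | zero => simp [loopA, segA]
  | succ n ih =>
      rw [loopA, ih, segA_succ]
      refine Prod.ext (by push_cast; ring) (Prod.ext (by push_cast; ring) (by simp))

theorem loopA7_eq_ew0 (ns ew : Int) (n : Nat) (x y : Int) (acc : List (Int × Int))
    (h : ew = 0) : loopA7 ns ew n x y acc = loopA ns (-ns) n x y acc := by
  subst h
  induction n generalizing x y acc with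
  | zero => simp [loopA7, loopA]
  | succ n ih => simp [loopA7, loopA, ih, sub_eq_add_neg]

theorem loopA7_eq_ne (ns ew : Int) (n : Nat) (x y : Int) (acc : List (Int × Int))
    (h : ¬ ew = 0) : loopA7 ns ew n x y acc = loopA (-ew) ew n x y acc := by
  induction n generalizing x y acc with
  | zero => simp [loopA7, loopA]
  | succ n ih => simp [loopA7, loopA, h, ih, sub_eq_add_neg]

-- the core geometric fact: A's walk is the canonical template placed by the
-- linear transform, for each of the four possible (ns, ew) direction pairs
theorem buildPath1_eq_canon (ns ew x1 y1 : Int)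
    (h : (ns = 1 ∧ ew = 0) ∨ (ns = -1 ∧ ew = 0) ∨ (ns = 0 ∧ ew = 1) ∨ (ns = 0 ∧ ew = -1)) :
    buildPath1 ns ew x1 y1 =
      canonHold.map (fun pq => (x1 + ns * pq.1 + ew * pq.2, y1 + ew * pq.1 + ns * pq.2)) := by
  rcases h with ⟨h1, h2⟩ | ⟨h1, h2⟩ | ⟨h1, h2⟩ | ⟨h1, h2⟩ <;> subst h1 <;> subst h2 <;>
  · simp only [buildPath1, loopA7_eq_ew0, loopA7_eq_ne, loopA_eq, canonHold, List.map_append,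
      List.map_map, List.nil_append, List.append_assoc, segA, neg_neg,
      one_ne_zero, neg_eq_zero, not_false_iff]
    repeat' refine congrArg₂ (· ++ ·) ?_ ?_
    all_goals
      refine List.map_congr_left fun i _ => ?_
      simp only [Function.comp_apply]
      exact Prod.ext (by ring) (by ring)

-- ===== VERDICT (by name: the statement is the Claim_ definition above) =====
theorem get_holdpoint_paths_spec : Claim_equal_get_holdpoint_paths := by
  intro a b facing_dir path_num just_start _ hpre
  unfold Pre_get_holdpoint_paths at hpre
  subst hpre
  show _ = _
  by_cases h2 : PySem.Int.mod facing_dir 2 = 0 <;> by_cases h3 : PySem.Int.mod facing_dir 3 = 0 <;>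
  · simp only [get_holdpoint_paths, get_holdpoint_paths_alt, h2, h3, if_true, if_false,
      Bool.false_eq_true]
    norm_num
    rw [buildPath1_eq_canon] <;> norm_num
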